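-- pv_equiv track=rewrite | github.com/Rufidatul726/scene-crafter | python-scripts/backend/utils/postprocess/nodes_processing/parent_checking.py | nonfirst_node_add_parent
-- ===== SOURCE A (Python) =====
-- def nonfirst_node_add_parent(scene_content):
--     """Add a parent attribute to all nodes except the first node in the scene."""
--     # Split the scene content into individual lines
--     scene_lines = scene_content.splitlines()
--     cleaned_lines = []
--     first_node = True
--
--     for line in scene_lines:
--         # Skip lines that don’t meet our conditions
--         line = line.strip()
--
--         # Skip empty lines
--         if not line:
--             continue
--
--         # If it's the first node, remove the parent attribute
--         if first_node and line.startswith("[node"):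
--             first_node = False
--
--         # If it's not the first node, add the parent attribute if it's missing at the end of the line
--         elif not first_node and line.startswith("[node") and line.endswith("]"):
--             if "parent=" not in line:
--                 # Add parent attribute to the node
--                 line = line.replace("]", " parent=\".\"]")
--
--         cleaned_lines.append(line)
--
--     # Reassemble the scene content
--     cleaned_scene = "\n".join(cleaned_lines)
--     return cleaned_scene
-- ===== SOURCE B (Python) =====
-- def nonfirst_node_add_parent(scene_content):
--     """Add a parent attribute to all nodes except the first node in the scene."""
--     # Strip every line and drop the empty ones.
--     cleaned = [ln for ln in (raw.strip() for raw in scene_content.splitlines()) if ln]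
--     # Index of the first node line, if any.
--     pivot = next((i for i, ln in enumerate(cleaned) if ln.startswith("[node")), None)
--     def fix(i, ln):
--         if (pivot is not None and i > pivot and ln.startswith("[node")
--                 and ln.endswith("]") and "parent=" not in ln):
--             return ln.replace("]", " parent=\".\"]")
--         return ln
--     return "\n".join(fix(i, ln) for i, ln in enumerate(cleaned))
-- ===== Notes on version B (the rewrite author's own statement) =====
-- stated objective: alternative
-- what changed: Replaces the single flag-carrying loop with a three-stage decomposition: build the cleaned (stripped, non-empty) line list, precompute the index of the first node-header line, then map over the enumerated list transforming only node lines strictly after that pivot.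
import Mathlib
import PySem

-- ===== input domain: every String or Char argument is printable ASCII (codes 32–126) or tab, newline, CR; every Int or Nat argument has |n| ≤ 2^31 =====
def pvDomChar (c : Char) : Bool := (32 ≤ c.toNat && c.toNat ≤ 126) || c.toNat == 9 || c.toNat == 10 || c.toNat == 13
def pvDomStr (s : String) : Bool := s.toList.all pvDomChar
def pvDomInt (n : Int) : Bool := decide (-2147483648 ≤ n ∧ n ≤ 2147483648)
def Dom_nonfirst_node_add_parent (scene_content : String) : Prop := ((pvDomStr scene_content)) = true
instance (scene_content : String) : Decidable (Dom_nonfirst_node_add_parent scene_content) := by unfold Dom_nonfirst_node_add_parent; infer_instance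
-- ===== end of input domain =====

-- B replaces A's single flag-carrying loop by a three-stage decomposition (clean, find the
-- pivot node index, map over the enumerated lines); alternative structure, same cost.

-- ===== PORT A =====
-- literal transliteration of A's loop: state = (first_node flag, accumulated cleaned_lines)
def nonfirst_node_add_parent (scene_content : String) : String :=
  let scene_lines := PySem.Str.splitlines scene_content
  let res := scene_lines.foldl (fun (st : Bool × List String) rawline =>
    let line := PySem.Str.strip rawline
    if line = "" then st
    else if st.1 && PySem.Str.startswith line "[node" then (false, st.2 ++ [line])
    else if (!st.1) && PySem.Str.startswith line "[node" && PySem.Str.endswith line "]" then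
      let line := if !(PySem.Str.isIn "parent=" line)
                  then PySem.Str.replace line "]" " parent=\".\"]" else line
      (st.1, st.2 ++ [line])
    else (st.1, st.2 ++ [line])) (true, ([] : List String))
  PySem.Str.join "\n" res.2

-- ===== PORT B =====
-- Source B's fix(i, ln): transform only node lines strictly after the pivot
def pvFixB (pivot : Option Int) (i : Int) (ln : String) : String :=
  match pivot with
  | some p =>
      if p < i ∧ PySem.Str.startswith ln "[node" = true ∧ PySem.Str.endswith ln "]" = true ∧
         PySem.Str.isIn "parent=" ln = false
      then PySem.Str.replace ln "]" " parent=\".\"]" else ln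
  | none => ln

def nonfirst_node_add_parent_alt (scene_content : String) : String :=
  let cleaned := ((PySem.Str.splitlines scene_content).map PySem.Str.strip).filter (fun l => l ≠ "")
  let pivot : Option Int :=
    ((PySem.List.enumerate cleaned).find? (fun p => PySem.Str.startswith p.2 "[node")).map (·.1)
  PySem.Str.join "\n" ((PySem.List.enumerate cleaned).map (fun p => pvFixB pivot p.1 p.2))

-- ===== PRECONDITION & SPEC =====
def Spec_nonfirst_node_add_parent (scene_content : String) (out : String) : Prop := out = nonfirst_node_add_parent_alt scene_content
instance (scene_content : String) (out : String) : Decidable (Spec_nonfirst_node_add_parent scene_content out) := by unfold Spec_nonfirst_node_add_parent; infer_instance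

-- ===== CLAIM (what is proved, stated in full; the proofs are below) =====
def Claim_equal_nonfirst_node_add_parent : Prop := ∀ (scene_content : String), Dom_nonfirst_node_add_parent scene_content → Spec_nonfirst_node_add_parent scene_content (nonfirst_node_add_parent scene_content)

-- ===== LEMMAS AND PROOFS =====

-- the full transformation applied by both versions to a post-pivot line
def pvTr (ln : String) : String :=
  if PySem.Str.startswith ln "[node" && PySem.Str.endswith ln "]" && !(PySem.Str.isIn "parent=" ln)
  then PySem.Str.replace ln "]" " parent=\".\"]" else ln

-- A's loop body on an already-cleaned (stripped, non-empty) line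
def pvStep (st : Bool × List String) (line : String) : Bool × List String :=
  if st.1 && PySem.Str.startswith line "[node" then (false, st.2 ++ [line])
  else if (!st.1) && PySem.Str.startswith line "[node" && PySem.Str.endswith line "]" then
    let line := if !(PySem.Str.isIn "parent=" line)
                then PySem.Str.replace line "]" " parent=\".\"]" else line
    (st.1, st.2 ++ [line])
  else (st.1, st.2 ++ [line])

lemma pvFixB_of_lt (p i : Int) (ln : String) (h : p < i) :
    pvFixB (some p) i ln = pvTr ln := by
  simp only [pvFixB, pvTr, Bool.and_eq_true, Bool.not_eq_true', h, true_and, and_assoc]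

-- A's output list, computed structurally from the cleaned list
def pvProc : List String → List String
  | [] => []
  | x :: xs =>
      if PySem.Str.startswith x "[node" then x :: xs.map pvTr
      else x :: pvProc xs

lemma pvFoldl_clean (lines : List String) (st : Bool × List String) :
    lines.foldl (fun (st : Bool × List String) rawline =>
      let line := PySem.Str.strip rawline
      if line = "" then st
      else if st.1 && PySem.Str.startswith line "[node" then (false, st.2 ++ [line])
      else if (!st.1) && PySem.Str.startswith line "[node" && PySem.Str.endswith line "]" then
        let line := if !(PySem.Str.isIn "parent=" line)
                    then PySem.Str.replace line "]" " parent=\".\"]" else line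
        (st.1, st.2 ++ [line])
      else (st.1, st.2 ++ [line])) st
    = ((lines.map PySem.Str.strip).filter (fun l => l ≠ "")).foldl pvStep st := by
  induction lines generalizing st with
  | nil => rfl
  | cons x xs ih =>
    simp only [List.foldl_cons, List.map_cons, List.filter_cons]
    by_cases h : PySem.Str.strip x = ""
    · simpa [h] using ih _
    · simp only [h, decide_not]
      rw [ih]
      simp [pvStep]

lemma pvFoldl_false (l : List String) (acc : List String) :
    l.foldl pvStep (false, acc) = (false, acc ++ l.map pvTr) := by
  induction l generalizing acc with
  | nil => simp
  | cons x xs ih =>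
    have hx : pvStep (false, acc) x = (false, acc ++ [pvTr x]) := by
      simp only [pvStep, pvTr, Bool.false_and, Bool.not_false, Bool.true_and, Bool.and_eq_true,
        Bool.not_eq_true', and_assoc]
      split_ifs <;> simp_all
    simp only [List.foldl_cons, hx, ih, List.map_cons]
    simp

lemma pvFoldl_true (l : List String) (acc : List String) :
    (l.foldl pvStep (true, acc)).2 = acc ++ pvProc l := by
  induction l generalizing acc with
  | nil => simp [pvProc]
  | cons x xs ih =>
    by_cases h : PySem.Str.startswith x "[node" = true
    · have hx : pvStep (true, acc) x = (false, acc ++ [x]) := by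
        simp only [pvStep, h, Bool.true_and, if_pos]
      rw [List.foldl_cons, hx, pvFoldl_false]
      simp only [pvProc]; rw [if_pos h]; simp
    · have hx : pvStep (true, acc) x = (true, acc ++ [x]) := by
        simp only [pvStep, Bool.true_and, Bool.not_true, Bool.false_and, if_neg h]
        rw [if_neg (by simp)]
      rw [List.foldl_cons, hx, ih]
      simp only [pvProc]; rw [if_neg h]; simp

lemma pvMapFix_post (xs : List String) (s p : Int) (h : p < s) :
    (PySem.List.enumerate xs s).map (fun q => pvFixB (some p) q.1 q.2) = xs.map pvTr := by
  induction xs generalizing s with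
  | nil => simp [PySem.List.enumerate_nil]
  | cons x xs ih =>
    rw [PySem.List.enumerate_cons]
    simp only [List.map_cons, pvFixB_of_lt _ _ _ h]
    rw [ih (s + 1) (by omega)]

lemma pvB_eq_proc (xs : List String) (s : Int) :
    (PySem.List.enumerate xs s).map (fun q =>
      pvFixB (((PySem.List.enumerate xs s).find? (fun p => PySem.Str.startswith p.2 "[node")).map (·.1)) q.1 q.2)
    = pvProc xs := by
  induction xs generalizing s with
  | nil => simp [pvProc, PySem.List.enumerate_nil]
  | cons x xs ih =>
    rw [PySem.List.enumerate_cons]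
    by_cases h : PySem.Str.startswith x "[node" = true
    · simp only [List.find?_cons_of_pos (p := fun q : Int × String => PySem.Str.startswith q.2 "[node")
        (a := (s, x)) (l := PySem.List.enumerate xs (s + 1)) h]
      simp only [List.map_cons, Option.map_some]
      have hx : pvFixB (some s) s x = x := by simp [pvFixB]
      rw [hx, pvMapFix_post xs (s + 1) s (by omega)]
      simp only [pvProc]; rw [if_pos h]
    · simp only [List.find?_cons_of_neg (p := fun q : Int × String => PySem.Str.startswith q.2 "[node")
        (a := (s, x)) (l := PySem.List.enumerate xs (s + 1)) h]
      simp only [List.map_cons]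
      have hx : pvFixB ((List.find? (fun p => PySem.Str.startswith p.2 "[node")
          (PySem.List.enumerate xs (s + 1))).map (·.1)) s x = x := by
        cases hf : List.find? (fun p => PySem.Str.startswith p.2 "[node")
            (PySem.List.enumerate xs (s + 1)) with
        | none => simp [pvFixB]
        | some q =>
          have hq := List.mem_of_find?_eq_some hf
          rw [PySem.List.mem_enumerate_iff] at hq
          obtain ⟨k, hk, rfl⟩ := hq
          simp only [Option.map_some, pvFixB]
          rw [if_neg]; rintro ⟨h1, -⟩; omega
      rw [hx, ih (s + 1)]
      simp only [pvProc]; rw [if_neg h]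

-- ===== VERDICT (by name: the statement is the Claim_ definition above) =====
theorem nonfirst_node_add_parent_spec : Claim_equal_nonfirst_node_add_parent := by
  intro s _
  unfold Spec_nonfirst_node_add_parent nonfirst_node_add_parent nonfirst_node_add_parent_alt
  simp only [pvFoldl_clean, pvFoldl_true, pvB_eq_proc, List.nil_append]
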